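-- pv_equiv track=rewrite | github.com/ShantanuV2709/CORPWISE | backend/app/db/ingest_system_docs.py | split_markdown_by_section
-- ===== SOURCE A (Python) =====
-- def split_markdown_by_section(text: str):
--     """
--     Splits markdown text into (section_title, section_body)
--     using ALL markdown heading levels (#, ##, ###).
--
--     Guarantees:
--     - One section per chunk
--     - No None / empty sections
--     """
--     sections = []
--     current_section = "overview"
--     buffer = []
--
--     for line in text.splitlines():
--         line = line.strip()
--
--         if line.startswith("#"):
--             if buffer:
--                 sections.append(
--                     (current_section, "\n".join(buffer).strip())
--                 )
--                 buffer = []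
--
--             current_section = line.lstrip("#").strip().lower()
--         else:
--             buffer.append(line)
--
--     if buffer:
--         sections.append(
--             (current_section, "\n".join(buffer).strip())
--         )
--
--     return sections
-- ===== SOURCE B (Python) =====
-- def split_markdown_by_section(text: str):
--     # Staged index-based algorithm: find all heading positions once, then cut the
--     # line list at those positions and emit one (title, body) pair per non-empty gap.
--     lines = [line.strip() for line in text.splitlines()]
--     heads = [i for i, line in enumerate(lines) if line.startswith("#")]
--     cuts = [-1] + heads + [len(lines)]
--     sections = []
--     for i, j in zip(cuts, cuts[1:]):
--         if i + 1 < j: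
--             title = "overview" if i < 0 else lines[i].lstrip("#").strip().lower()
--             sections.append((title, "\n".join(lines[i + 1 : j]).strip()))
--     return sections
-- ===== Notes on version B (the rewrite author's own statement) =====
-- stated objective: alternative
-- what changed: B replaces A's buffer-and-flush state machine with staged passes: strip all lines once, collect the list of heading-line indices, form cut points [-1]+heads+[len], and for each adjacent cut pair with a non-empty gap emit (title of the left cut heading or 'overview', joined slice of the gap).
import Mathlib
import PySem

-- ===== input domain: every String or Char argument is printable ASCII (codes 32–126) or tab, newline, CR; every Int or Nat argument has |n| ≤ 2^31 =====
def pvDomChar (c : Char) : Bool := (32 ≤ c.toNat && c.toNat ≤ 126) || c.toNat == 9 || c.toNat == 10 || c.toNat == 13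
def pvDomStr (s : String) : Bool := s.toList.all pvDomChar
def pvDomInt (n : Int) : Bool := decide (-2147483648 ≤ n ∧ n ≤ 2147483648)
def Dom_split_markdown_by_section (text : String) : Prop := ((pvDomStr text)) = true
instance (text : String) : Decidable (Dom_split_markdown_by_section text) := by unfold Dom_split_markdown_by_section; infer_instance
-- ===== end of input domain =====

-- B replaces A's buffer-and-flush loop with staged passes: collect heading indices,
-- then slice the line list between adjacent cut points (objective: alternative).

-- shared helpers: both Pythons compute line.lstrip("#").strip().lower() and "\n".join(buf).strip();
-- lstrip("#") is ported by hand as dropWhile (· == '#') (exact: drops leading chars from the set {'#'})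
def pvTitle (line : String) : String :=
  PySem.Str.lower (PySem.Str.strip (String.ofList (line.toList.dropWhile (· == '#'))))

def pvBody (buf : List String) : String :=
  PySem.Str.strip (PySem.Str.join "\n" buf)

def pvKey (line : String) : Bool := PySem.Str.startswith line "#"

-- ===== PORT A =====
-- loop body of A on the already-stripped line (A strips at the top of the loop)
def pvLineStep (st : List (String × String) × String × List String) (line : String) :
    List (String × String) × String × List String :=
  if pvKey line then
    let sections := if st.2.2 ≠ [] then st.1 ++ [(st.2.1, pvBody st.2.2)] else st.1
    (sections, pvTitle line, [])
  else
    (st.1, st.2.1, st.2.2 ++ [line])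

def split_markdown_by_section (text : String) : List (String × String) :=
  let r := (PySem.Str.splitlines text).foldl
    (fun st rawline => pvLineStep st (PySem.Str.strip rawline)) ([], "overview", [])
  if r.2.2 ≠ [] then r.1 ++ [(r.2.1, pvBody r.2.2)] else r.1

-- ===== PORT B =====
def split_markdown_by_section_alt (text : String) : List (String × String) :=
  let lines := (PySem.Str.splitlines text).map PySem.Str.strip
  let heads : List Int := ((PySem.List.enumerate lines 0).filter (fun p => pvKey p.2)).map (fun p => p.1)
  let cuts : List Int := [-1] ++ heads ++ [(lines.length : Int)]
  (cuts.zip (PySem.List.slice cuts (some 1) none)).foldl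
    (fun sections p =>
      if p.1 + 1 < p.2 then
        sections ++ [((if p.1 < 0 then "overview" else pvTitle (PySem.List.pyGetD lines p.1 "")),
                      pvBody (PySem.List.slice lines (some (p.1 + 1)) (some p.2)))]
      else sections) []

-- ===== PRECONDITION & SPEC =====
def Spec_split_markdown_by_section (text : String) (out : List (String × String)) : Prop := out = split_markdown_by_section_alt text
instance (text : String) (out : List (String × String)) : Decidable (Spec_split_markdown_by_section text out) := by unfold Spec_split_markdown_by_section; infer_instance

-- ===== CLAIM =====
def Claim_equal_split_markdown_by_section : Prop := ∀ (text : String), Dom_split_markdown_by_section text → Spec_split_markdown_by_section text (split_markdown_by_section text)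

-- ===== LEMMAS AND PROOFS =====

-- A's final flush, as a function of the loop state
def pvFinish (r : List (String × String) × String × List String) : List (String × String) :=
  if r.2.2 ≠ [] then r.1 ++ [(r.2.1, pvBody r.2.2)] else r.1

-- the common recursive specification both programs compute
def Bspec (c : String) : List String → List (String × String)
  | [] => []
  | a :: t =>
    if pvKey a then Bspec (pvTitle a) t
    else (c, pvBody (a :: t.takeWhile (fun l => !pvKey l))) ::
      Bspec c (t.dropWhile (fun l => !pvKey l))
termination_by l => l.length
decreasing_by
  · simp
  · simpa using Nat.lt_succ_of_le (List.length_dropWhile_le _ _)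

-- heading indices of the suffix starting at absolute position n
def pvIdx : List String → Nat → List Int
  | [], _ => []
  | a :: t, n => if pvKey a then (n : Int) :: pvIdx t (n + 1) else pvIdx t (n + 1)

def pvEmit (L : List String) (i j : Int) : List (String × String) :=
  if i + 1 < j then
    [((if i < 0 then "overview" else pvTitle (PySem.List.pyGetD L i "")),
      pvBody (PySem.List.slice L (some (i + 1)) (some j)))]
  else []

def pvPairs (L : List String) : List Int → List (String × String)
  | i :: j :: rest => pvEmit L i j ++ pvPairs L (j :: rest)
  | _ => []

lemma pvPairs_cons (L : List String) (i j : Int) (rest : List Int) :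
    pvPairs L (i :: j :: rest) = pvEmit L i j ++ pvPairs L (j :: rest) := by
  simp [pvPairs]

lemma pvPairs_pair (L : List String) (i j : Int) :
    pvPairs L [i, j] = pvEmit L i j := by
  simp [pvPairs]

lemma pv_dropWhile_head_false {p : String → Bool} :
    ∀ (l : List String) (x : String) (xs : List String),
      l.dropWhile p = x :: xs → p x = false := by
  intro l
  induction l with
  | nil => intro x xs h; simp at h
  | cons a t ih =>
    intro x xs h
    by_cases hp : p a
    · rw [List.dropWhile_cons_of_pos hp] at h
      exact ih x xs h
    · rw [List.dropWhile_cons_of_neg hp] at h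
      cases h
      simpa using hp

lemma pv_idx_append_body :
    ∀ (b r : List String) (m : Nat), (∀ l ∈ b, pvKey l = false) →
      pvIdx (b ++ r) m = pvIdx r (m + b.length) := by
  intro b
  induction b with
  | nil => intro r m _; simp [pvIdx]
  | cons a t ih =>
    intro r m hall
    have ha : pvKey a = false := hall a (by simp)
    rw [show pvIdx ((a :: t) ++ r) m = pvIdx (t ++ r) (m + 1) from by simp [pvIdx, ha]]
    rw [ih r (m + 1) (fun l hl => hall l (by simp [hl]))]
    congr 1
    simp only [List.length_cons]
    omega

lemma pv_run_body :
    ∀ (run : List String), (∀ l ∈ run, pvKey l = false) →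
      ∀ (s : List (String × String)) (c : String) (b : List String),
        run.foldl pvLineStep (s, c, b) = (s, c, b ++ run) := by
  intro run
  induction run with
  | nil => intro _ s c b; simp
  | cons a t ih =>
    intro hall s c b
    have ha : pvKey a = false := hall a (by simp)
    simp only [List.foldl_cons]
    rw [show pvLineStep (s, c, b) a = (s, c, b ++ [a]) from by simp [pvLineStep, ha]]
    rw [ih (fun l hl => hall l (by simp [hl])) s c (b ++ [a])]
    simp

-- A-side: the state machine computes Bspec
lemma pv_A_spec : ∀ (n : Nat) (lines : List String), lines.length ≤ n →
    ∀ (s : List (String × String)) (c : String),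
      pvFinish (lines.foldl pvLineStep (s, c, [])) = s ++ Bspec c lines := by
  intro n
  induction n with
  | zero =>
    intro lines hlen s c
    have : lines = [] := List.eq_nil_of_length_eq_zero (Nat.le_zero.mp hlen)
    subst this
    simp [pvFinish, Bspec]
  | succ n ih =>
    intro lines hlen s c
    cases lines with
    | nil => simp [pvFinish, Bspec]
    | cons a t =>
      have ht : t.length ≤ n := by simpa using hlen
      cases hk : pvKey a with
      | true =>
        simp only [List.foldl_cons]
        rw [show pvLineStep (s, c, []) a = (s, pvTitle a, []) from by simp [pvLineStep, hk]]
        rw [ih t ht s (pvTitle a)]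
        simp [Bspec, hk]
      | false =>
        set b := a :: t.takeWhile (fun l => !pvKey l) with hb
        set r := t.dropWhile (fun l => !pvKey l) with hr
        have hsplit : a :: t = b ++ r := by
          simp [hb, hr, List.takeWhile_append_dropWhile]
        have hballn : ∀ l ∈ b, pvKey l = false := by
          intro l hl
          rcases List.mem_cons.mp hl with rfl | hl
          · exact hk
          · have := List.mem_takeWhile_imp hl
            simpa using this
        conv_lhs => rw [hsplit]
        rw [List.foldl_append, pv_run_body b hballn s c []]
        simp only [List.nil_append]
        cases hrc : r with
        | nil =>
          have hbne : b ≠ [] := by simp [hb]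
          simp only [List.foldl_nil]
          rw [show pvFinish (s, c, b) = s ++ [(c, pvBody b)] from by simp [pvFinish, hbne]]
          simp [Bspec, hk, ← hb, ← hr, hrc]
        | cons h t' =>
          have hh : pvKey h = true := by
            have := pv_dropWhile_head_false t h t' (hr.symm.trans hrc)
            simpa using this
          have ht' : t'.length ≤ n := by
            have h1 : r.length ≤ t.length := by
              rw [hr]; exact List.length_dropWhile_le _ _
            rw [hrc] at h1
            simp at h1
            omega
          have hbne : b ≠ [] := by simp [hb]
          simp only [List.foldl_cons]
          rw [show pvLineStep (s, c, b) h = (s ++ [(c, pvBody b)], pvTitle h, []) from by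
            simp [pvLineStep, hh, hbne]]
          rw [ih t' ht' (s ++ [(c, pvBody b)]) (pvTitle h)]
          rw [show Bspec c (a :: t) = (c, pvBody b) :: Bspec c r from by
            simp [Bspec, hk, ← hb, ← hr]]
          rw [hrc]
          simp [Bspec, hh]

-- B-side: the cut-pair scan computes Bspec
lemma pv_B_spec : ∀ (n : Nat) (L rest : List String) (prev : Int) (m : Nat),
    rest.length ≤ n → rest = L.drop m → prev + 1 = (m : Int) → m ≤ L.length →
    pvPairs L (prev :: (pvIdx rest m ++ [(L.length : Int)])) =
      Bspec (if prev < 0 then "overview" else pvTitle (L.getD prev.toNat "")) rest := by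
  intro n
  induction n with
  | zero =>
    intro L rest prev m hlen hdrop hprev hm
    have : rest = [] := List.eq_nil_of_length_eq_zero (Nat.le_zero.mp hlen)
    subst this
    have hml : L.length ≤ m := by
      have := congrArg List.length hdrop
      simp at this
      omega
    have hmeq : m = L.length := le_antisymm hm hml
    simp only [pvIdx, List.nil_append]
    rw [show pvPairs L [prev, (L.length : Int)] = pvEmit L prev (L.length : Int) from by
      simp [pvPairs]]
    rw [show pvEmit L prev (L.length : Int) = [] from by
      simp only [pvEmit]
      rw [if_neg]
      omega]
    simp [Bspec]
  | succ n ih =>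
    intro L rest prev m hlen hdrop hprev hm
    cases rest with
    | nil =>
      have hml : L.length ≤ m := by
        have := congrArg List.length hdrop
        simp at this
        omega
      have hmeq : m = L.length := le_antisymm hm hml
      simp only [pvIdx, List.nil_append]
      rw [show pvPairs L [prev, (L.length : Int)] = pvEmit L prev (L.length : Int) from by
        simp [pvPairs]]
      rw [show pvEmit L prev (L.length : Int) = [] from by
        simp only [pvEmit]
        rw [if_neg]
        omega]
      simp [Bspec]
    | cons a t =>
      have hmlt : m < L.length := by
        by_contra hcon
        have : L.drop m = [] := List.drop_eq_nil_of_le (by omega)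
        rw [← hdrop] at this
        simp at this
      have hLa : L[m] = a := by
        have := List.drop_eq_getElem_cons hmlt
        rw [← hdrop] at this
        exact (List.cons.injEq _ _ _ _ ▸ this).1.symm
      have htdrop : t = L.drop (m + 1) := by
        have := List.drop_eq_getElem_cons hmlt
        rw [← hdrop, hLa] at this
        exact (List.cons.injEq _ _ _ _ ▸ this).2
      have ht : t.length ≤ n := by simpa using hlen
      cases hk : pvKey a with
      | true =>
        rw [show pvIdx (a :: t) m = (m : Int) :: pvIdx t (m + 1) from by simp [pvIdx, hk]]
        simp only [List.cons_append]
        rw [pvPairs_cons]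
        rw [show pvEmit L prev (m : Int) = [] from by
          simp only [pvEmit]; rw [if_neg]; omega]
        rw [ih L t (m : Int) (m + 1) ht htdrop (by push_cast; ring) (by omega)]
        have hgd : L.getD ((m : Int)).toNat "" = a := by
          rw [show ((m : Int)).toNat = m from by omega, List.getD_eq_getElem L "" hmlt, hLa]
        rw [show (if (m : Int) < 0 then "overview" else pvTitle (L.getD ((m : Int)).toNat "")) =
              pvTitle a from by rw [if_neg (by omega), hgd]]
        simp [Bspec, hk]
      | false =>
        set b := a :: t.takeWhile (fun l => !pvKey l) with hb
        set r := t.dropWhile (fun l => !pvKey l) with hr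
        have hsplit : a :: t = b ++ r := by
          simp [hb, hr, List.takeWhile_append_dropWhile]
        have hballn : ∀ l ∈ b, pvKey l = false := by
          intro l hl
          rcases List.mem_cons.mp hl with rfl | hl
          · exact hk
          · have := List.mem_takeWhile_imp hl
            simpa using this
        have hk1 : 1 ≤ b.length := by simp [hb]
        have hrest_len : b.length + r.length = (a :: t).length := by
          rw [hsplit]; simp
        have hrdrop : r = L.drop (m + b.length) := by
          have h1 : (a :: t).drop b.length = r := by rw [hsplit]; simp
          rw [← h1, hdrop, List.drop_drop]
        have hidx : pvIdx (a :: t) m = pvIdx r (m + b.length) := by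
          rw [hsplit]; exact pv_idx_append_body b r m hballn
        have hslice : PySem.List.slice L (some (m : Int)) (some ((m + b.length : Nat) : Int)) = b := by
          rw [PySem.List.slice_natCast L m (m + b.length), ← hdrop, hsplit]
          rw [show m + b.length - m = b.length from by omega]
          simp [List.take_append]
        have htitle : (if prev < 0 then "overview" else pvTitle (PySem.List.pyGetD L prev "")) =
            (if prev < 0 then "overview" else pvTitle (L.getD prev.toNat "")) := by
          by_cases hp : prev < 0
          · simp [hp]
          · rw [if_neg hp, if_neg hp]
            rw [show prev = ((prev.toNat : Nat) : Int) from by omega, PySem.List.pyGetD_natCast]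
            simp
            rw [show max prev 0 = prev from by omega]
        rw [hidx]
        cases hrc : r with
        | nil =>
          have hLlen : L.length = m + b.length := by
            have h1 := congrArg List.length hsplit
            have h2 := congrArg List.length hdrop
            rw [hrc] at h1
            simp at h1 h2
            omega
          simp only [pvIdx, List.nil_append]
          rw [pvPairs_pair]
          rw [show pvEmit L prev (L.length : Int) =
                [((if prev < 0 then "overview" else pvTitle (PySem.List.pyGetD L prev "")),
                  pvBody b)] from by
            simp only [pvEmit]
            rw [if_pos (by omega)]
            rw [show prev + 1 = ((m : Nat) : Int) from hprev]
            rw [show ((L.length : Nat) : Int) = (((m + b.length : Nat) : Nat) : Int) from by rw [hLlen]]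
            rw [hslice]]
          rw [htitle]
          rw [show Bspec (if prev < 0 then "overview" else pvTitle (L.getD prev.toNat "")) (a :: t) =
                (((if prev < 0 then "overview" else pvTitle (L.getD prev.toNat "")), pvBody b)) ::
                  Bspec (if prev < 0 then "overview" else pvTitle (L.getD prev.toNat "")) r from by
            simp [Bspec, hk, ← hb, ← hr]]
          rw [hrc]
          simp [Bspec]
        | cons h t' =>
          have hh : pvKey h = true := by
            have := pv_dropWhile_head_false t h t' (hr.symm.trans hrc)
            simpa using this
          have hrdrop' : h :: t' = L.drop (m + b.length) := hrc.symm.trans hrdrop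
          have hj0 : m + b.length < L.length := by
            by_contra hcon
            have hnil : L.drop (m + b.length) = [] := List.drop_eq_nil_of_le (by omega)
            rw [← hrdrop'] at hnil
            simp at hnil
          have hLh : L[m + b.length] = h := by
            have := List.drop_eq_getElem_cons hj0
            rw [← hrdrop'] at this
            exact (List.cons.injEq _ _ _ _ ▸ this).1.symm
          have ht'drop : t' = L.drop (m + b.length + 1) := by
            have := List.drop_eq_getElem_cons hj0
            rw [← hrdrop', hLh] at this
            exact (List.cons.injEq _ _ _ _ ▸ this).2
          have ht'len : t'.length ≤ n := by
            have h1 : r.length ≤ t.length := by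
              rw [hr]; exact List.length_dropWhile_le _ _
            rw [hrc] at h1
            simp at h1
            omega
          rw [show pvIdx (h :: t') (m + b.length) = ((m + b.length : Nat) : Int) :: pvIdx t' (m + b.length + 1) from by
            simp [pvIdx, hh]]
          simp only [List.cons_append]
          rw [pvPairs_cons]
          rw [show pvEmit L prev ((m + b.length : Nat) : Int) =
                [((if prev < 0 then "overview" else pvTitle (PySem.List.pyGetD L prev "")),
                  pvBody b)] from by
            simp only [pvEmit]
            rw [if_pos (by omega)]
            rw [show prev + 1 = ((m : Nat) : Int) from hprev]
            rw [hslice]]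
          rw [ih L t' ((m + b.length : Nat) : Int) (m + b.length + 1) ht'len ht'drop (by push_cast; ring) (by omega)]
          have hgd : L.getD (((m + b.length : Nat) : Int)).toNat "" = h := by
            rw [show (((m + b.length : Nat) : Int)).toNat = m + b.length from by omega,
              List.getD_eq_getElem L "" hj0, hLh]
          rw [show (if ((m + b.length : Nat) : Int) < 0 then "overview"
                else pvTitle (L.getD (((m + b.length : Nat) : Int)).toNat "")) = pvTitle h from by
            rw [if_neg (by omega), hgd]]
          rw [htitle]
          rw [show Bspec (if prev < 0 then "overview" else pvTitle (L.getD prev.toNat "")) (a :: t) =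
                (((if prev < 0 then "overview" else pvTitle (L.getD prev.toNat "")), pvBody b)) ::
                  Bspec (if prev < 0 then "overview" else pvTitle (L.getD prev.toNat "")) r from by
            simp [Bspec, hk, ← hb, ← hr]]
          rw [hrc]
          simp [Bspec, hh]

-- fold over zipped cut pairs = pvPairs
lemma pv_fold_pairs : ∀ (L : List String) (c : List Int) (acc : List (String × String)),
    (c.zip c.tail).foldl
      (fun sections p =>
        if p.1 + 1 < p.2 then
          sections ++ [((if p.1 < 0 then "overview" else pvTitle (PySem.List.pyGetD L p.1 "")),
                        pvBody (PySem.List.slice L (some (p.1 + 1)) (some p.2)))]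
        else sections) acc = acc ++ pvPairs L c := by
  intro L c
  induction c with
  | nil => intro acc; simp [pvPairs]
  | cons i rest ih =>
    cases rest with
    | nil => intro acc; simp [pvPairs]
    | cons j rest' =>
      intro acc
      rw [show (i :: j :: rest').zip (i :: j :: rest').tail =
            (i, j) :: ((j :: rest').zip (j :: rest').tail) from by simp [List.zip]]
      simp only [List.foldl_cons]
      rw [show pvPairs L (i :: j :: rest') = pvEmit L i j ++ pvPairs L (j :: rest') from by
        simp [pvPairs]]
      by_cases hij : i + 1 < j
      · rw [if_pos hij]
        rw [ih (acc ++ [((if i < 0 then "overview" else pvTitle (PySem.List.pyGetD L i "")),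
            pvBody (PySem.List.slice L (some (i + 1)) (some j)))])]
        simp [pvEmit, hij]
      · rw [if_neg hij]
        rw [ih acc]
        simp [pvEmit, hij]

-- enumerate-filter-map = pvIdx
lemma pv_idx_enum : ∀ (lines : List String) (n : Nat),
    ((PySem.List.enumerate lines (n : Int)).filter (fun p => pvKey p.2)).map (fun p => p.1) =
      pvIdx lines n := by
  intro lines
  induction lines with
  | nil => intro n; simp [pvIdx, PySem.List.enumerate_nil]
  | cons a t ih =>
    intro n
    rw [PySem.List.enumerate_cons]
    rw [show ((n : Int), a) :: PySem.List.enumerate t ((n : Int) + 1) =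
          ((n : Int), a) :: PySem.List.enumerate t (((n + 1 : Nat) : Int)) from by push_cast; ring_nf]
    cases hk : pvKey a with
    | true =>
      simp [List.filter_cons, hk, pvIdx]
      have h := ih (n + 1)
      push_cast at h
      exact h
    | false =>
      simp [List.filter_cons, hk, pvIdx]
      have h := ih (n + 1)
      push_cast at h
      exact h

-- ===== VERDICT =====
theorem split_markdown_by_section_spec : Claim_equal_split_markdown_by_section := by
  intro text _
  unfold Spec_split_markdown_by_section split_markdown_by_section split_markdown_by_section_alt
  set L := (PySem.Str.splitlines text).map PySem.Str.strip with hL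
  have hm : L.foldl pvLineStep
        (([], "overview", []) : List (String × String) × String × List String) =
      (PySem.Str.splitlines text).foldl
        (fun st raw => pvLineStep st (PySem.Str.strip raw)) ([], "overview", []) := by
    rw [hL, List.foldl_map]
  have hA := pv_A_spec L.length L le_rfl [] "overview"
  rw [hm] at hA
  rw [show (if ((PySem.Str.splitlines text).foldl
        (fun st raw => pvLineStep st (PySem.Str.strip raw)) ([], "overview", [])).2.2 ≠ [] then
        ((PySem.Str.splitlines text).foldl
          (fun st raw => pvLineStep st (PySem.Str.strip raw)) ([], "overview", [])).1 ++
          [(((PySem.Str.splitlines text).foldl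
            (fun st raw => pvLineStep st (PySem.Str.strip raw)) ([], "overview", [])).2.1,
            pvBody ((PySem.Str.splitlines text).foldl
              (fun st raw => pvLineStep st (PySem.Str.strip raw)) ([], "overview", [])).2.2)]
      else ((PySem.Str.splitlines text).foldl
        (fun st raw => pvLineStep st (PySem.Str.strip raw)) ([], "overview", [])).1) =
      pvFinish ((PySem.Str.splitlines text).foldl
        (fun st raw => pvLineStep st (PySem.Str.strip raw)) ([], "overview", [])) from rfl]
  rw [hA]
  show [] ++ Bspec "overview" L =
    ((([(-1 : Int)] ++ ((PySem.List.enumerate L 0).filter (fun p => pvKey p.2)).map (fun p => p.1) ++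
        [(L.length : Int)]).zip
      (PySem.List.slice
        ([(-1 : Int)] ++ ((PySem.List.enumerate L 0).filter (fun p => pvKey p.2)).map (fun p => p.1) ++
          [(L.length : Int)]) (some 1) none)).foldl
      (fun sections p =>
        if p.1 + 1 < p.2 then
          sections ++ [((if p.1 < 0 then "overview" else pvTitle (PySem.List.pyGetD L p.1 "")),
                        pvBody (PySem.List.slice L (some (p.1 + 1)) (some p.2)))]
        else sections) [])
  rw [PySem.List.slice_from_one]
  rw [show ((PySem.List.enumerate L 0).filter (fun p => pvKey p.2)).map (fun p => p.1) =
        pvIdx L 0 from by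
    have := pv_idx_enum L 0
    simpa using this]
  rw [show ([(-1 : Int)] ++ pvIdx L 0 ++ [(L.length : Int)]).tail =
        pvIdx L 0 ++ [(L.length : Int)] from rfl]
  rw [show ([(-1 : Int)] ++ pvIdx L 0 ++ [(L.length : Int)]) =
        (-1 : Int) :: (pvIdx L 0 ++ [(L.length : Int)]) from rfl]
  rw [show ((-1 : Int) :: (pvIdx L 0 ++ [(L.length : Int)])).zip (pvIdx L 0 ++ [(L.length : Int)]) =
        ((-1 : Int) :: (pvIdx L 0 ++ [(L.length : Int)])).zip
          ((-1 : Int) :: (pvIdx L 0 ++ [(L.length : Int)])).tail from rfl]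
  rw [pv_fold_pairs L ((-1 : Int) :: (pvIdx L 0 ++ [(L.length : Int)])) []]
  rw [pv_B_spec L.length L L (-1) 0 le_rfl (by simp) (by norm_num) (by omega)]
  simp
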